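-- pv_equiv track=rewrite | github.com/Suirotras/Rosalind_scripts | Bioinformatics_Stronghold/010_Consensus_and_Profile/code_1.py | get_site_count
-- ===== SOURCE A (Python) =====
-- def get_site_count(seq_dict):
--     site_counts = {}
--
--     nucl_counts_list = ["", "", "", ""]
--
--     for index in range(len(next(iter(seq_dict.values())))):
--
--         site = list(map(lambda x: x[index], seq_dict.values()))
--
--         # generate a list giving site specific nucl counts for A,C,G,T
--         nucl_counts = [str(site.count(nucl)) for nucl in "ACGT"]
--         nucl_counts_list = [old_pos + new_pos + " " for new_pos, old_pos in zip(nucl_counts, nucl_counts_list)]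
--
--     #remove whitespace at string ends
--     nucl_counts_list = map(lambda x: x[:-1], nucl_counts_list)
--
--     # add to dictionary
--     for key, value in zip(["A","C","G","T"], nucl_counts_list):
--         site_counts[key] = value
--
--     return site_counts
-- ===== SOURCE B (Python) =====
-- def get_site_count(seq_dict):
--     vals = seq_dict.values()
--     L = len(next(iter(vals)))
--     counts = {n: [0] * L for n in "ACGT"}
--     for seq in vals:
--         for i in range(L):
--             ch = seq[i]
--             if ch in counts:
--                 counts[ch][i] += 1
--     return {n: " ".join(map(str, counts[n])) for n in "ACGT"}
-- ===== Notes on version B (the rewrite author's own statement) =====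
-- stated objective: alternative
-- what changed: A scans each column and calls site.count four times per position while concatenating four growing strings and trimming a trailing space; B makes one row-major pass maintaining an A/C/G/T -> per-position integer count table and joins each row of the table with ' '.
import Mathlib
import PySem

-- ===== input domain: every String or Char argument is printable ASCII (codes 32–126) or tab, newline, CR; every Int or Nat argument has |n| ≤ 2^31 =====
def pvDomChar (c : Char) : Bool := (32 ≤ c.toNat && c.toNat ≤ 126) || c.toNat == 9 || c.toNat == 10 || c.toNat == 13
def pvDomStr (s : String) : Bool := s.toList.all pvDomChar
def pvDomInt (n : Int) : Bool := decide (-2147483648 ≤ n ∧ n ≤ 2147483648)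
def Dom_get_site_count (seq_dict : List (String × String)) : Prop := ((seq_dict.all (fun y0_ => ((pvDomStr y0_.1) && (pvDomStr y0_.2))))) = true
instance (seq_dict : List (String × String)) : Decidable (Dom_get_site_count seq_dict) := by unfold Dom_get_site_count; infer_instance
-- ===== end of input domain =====

-- B replaces A's per-column `.count` scans and incremental string building by a single
-- row-major pass over the sequences maintaining an A/C/G/T count table (objective: alternative).

-- ===== PORT A =====
-- Literal port of A.  Strings are built as List Char (PySem convention).  `next(iter(...))`
-- on the empty dict raises StopIteration and `x[index]` raises IndexError on short rows:
-- both are excluded by Pre_; `headD ""` / `.getD ' '` are the total stand-ins there.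
def get_site_count (seq_dict : List (String × String)) : List (String × String) :=
  let vals := (PySem.Dict.ofList seq_dict).values
  let nucl_counts_list0 : List (List Char) := [[], [], [], []]
  let nucl_counts_list :=
    (PySem.List.pyRange 0 (PySem.Str.len (vals.headD ""))).foldl
      (fun acc index =>
        let site : List Char := vals.map (fun x => (PySem.Str.pyGet? x index).getD ' ')
        let nucl_counts := "ACGT".toList.map
          (fun nucl => PySem.Int.toChars ((PySem.List.count site nucl : Nat) : Int))
        List.zipWith (fun new_pos old_pos => old_pos ++ new_pos ++ [' ']) nucl_counts acc)
      nucl_counts_list0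
  let nucl_counts_list' := nucl_counts_list.map (fun x => PySem.List.slice x none (some (-1)))
  ((List.zip ["A", "C", "G", "T"] nucl_counts_list').foldl
      (fun d p => d.insert p.1 (String.ofList p.2)) PySem.Dict.empty).items

-- ===== PORT B =====
-- Literal port of Source B: one pass over the rows, `counts[ch][i] += 1`, then join.
def get_site_count_alt (seq_dict : List (String × String)) : List (String × String) :=
  let vals := (PySem.Dict.ofList seq_dict).values
  let L := PySem.Str.len (vals.headD "")
  let counts0 : PySem.Dict Char (List Int) :=
    "ACGT".toList.foldl (fun d n => d.insert n (List.replicate L.toNat 0)) PySem.Dict.empty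
  let counts := vals.foldl
    (fun d seq =>
      (PySem.List.pyRange 0 L).foldl
        (fun d i =>
          if d.contains ((PySem.Str.pyGet? seq i).getD ' ') then
            d.modify ((PySem.Str.pyGet? seq i).getD ' ') []
              (fun l => PySem.List.pySetD l i (PySem.List.pyGetD l i 0 + 1))
          else d)
        d)
    counts0
  ("ACGT".toList.foldl
      (fun out n =>
        out.insert (String.ofList [n])
          (String.ofList (PySem.Chars.join [' '] ((counts.getD n []).map PySem.Int.toChars))))
      PySem.Dict.empty).items

-- ===== PRECONDITION & SPEC =====
-- Pre_ excludes exactly the inputs where the Python A raises: the empty dict (StopIteration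
-- from next(iter(...))) and dicts in which some sequence is shorter than the first one
-- (IndexError from x[index]).
def Pre_get_site_count (seq_dict : List (String × String)) : Prop :=
  (PySem.Dict.ofList seq_dict).values ≠ [] ∧
  ∀ v ∈ (PySem.Dict.ofList seq_dict).values,
    PySem.Str.len (((PySem.Dict.ofList seq_dict).values).headD "") ≤ PySem.Str.len v
instance (seq_dict : List (String × String)) : Decidable (Pre_get_site_count seq_dict) := by
  unfold Pre_get_site_count; infer_instance
def pvWitness_get_site_count : (List (String × String)) := [("s1", "ACGT"), ("s2", "AACCT")]
def Spec_get_site_count (seq_dict : List (String × String)) (out : List (String × String)) : Prop := out = get_site_count_alt seq_dict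
instance (seq_dict : List (String × String)) (out : List (String × String)) : Decidable (Spec_get_site_count seq_dict out) := by unfold Spec_get_site_count; infer_instance

-- ===== CLAIM (what is proved, stated in full; the proofs are below) =====
def Claim_equal_get_site_count : Prop := ∀ (seq_dict : List (String × String)), Dom_get_site_count seq_dict → Pre_get_site_count seq_dict → Spec_get_site_count seq_dict (get_site_count seq_dict)


-- ===== LEMMAS AND PROOFS =====

-- the column of characters A inspects at index i
def pvSite (vals : List String) (i : Int) : List Char :=
  vals.map (fun x => (PySem.Str.pyGet? x i).getD ' ')

-- A's count of nucleotide n in column i, as an Int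
def pvCnt (vals : List String) (n : Char) (i : Int) : Int :=
  ((PySem.List.count (pvSite vals i) n : Nat) : Int)

-- A's accumulated string (as chars) for nucleotide n after the first N columns
def pvColStr (vals : List String) (n : Char) (N : Nat) : List Char :=
  (List.range N).flatMap (fun (k : Nat) => PySem.Int.toChars (pvCnt vals n (k : Int)) ++ [' '])

-- pvCnt at a Nat index (names the cast, keeping statements free of list coercions)
def pvCntN (vals : List String) (n : Char) (k : Nat) : Int := pvCnt vals n (k : Int)

-- B's per-row count-list update: +1 at every index where the row has nucleotide n
def pvBump (l : List Int) (r : List Char) (n : Char) : List Int :=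
  l.zipIdx.map (fun p => if r[p.2]? = some n then p.1 + 1 else p.1)

theorem pvBump_length (l : List Int) (r : List Char) (n : Char) :
    (pvBump l r n).length = l.length := by
  simp [pvBump]

theorem pvBump_getElem? (l : List Int) (r : List Char) (n : Char) (k : Nat) :
    (pvBump l r n)[k]? = l[k]?.map (fun x => if r[k]? = some n then x + 1 else x) := by
  unfold pvBump
  simp only [List.getElem?_map, List.getElem?_zipIdx]
  cases l[k]? <;> simp

theorem pvBump_nil (l : List Int) (n : Char) : pvBump l [] n = l := by
  simp only [pvBump, List.getElem?_nil]
  simp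

-- appending one character to the row bumps (only) position r.length
theorem pvBump_append (l : List Int) (r : List Char) (c n : Char) (h : r.length < l.length) :
    pvBump l (r ++ [c]) n =
      if n = c then
        (pvBump l r n).set r.length ((pvBump l r n).getD r.length 0 + 1)
      else pvBump l r n := by
  have hlen : (pvBump l r n).length = l.length := pvBump_length l r n
  have hr : r[r.length]? = none := List.getElem?_eq_none_iff.mpr (by omega)
  rcases eq_or_ne n c with hnc | hnc
  · subst hnc
    rw [if_pos rfl]
    apply List.ext_getElem?
    intro k
    rw [pvBump_getElem?, List.getElem?_set]
    by_cases hk : r.length = k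
    · subst hk
      rw [if_pos rfl, if_pos (by omega)]
      obtain ⟨x, hx⟩ : ∃ x, l[r.length]? = some x :=
        ⟨l[r.length]'(by omega), List.getElem?_eq_getElem (by omega)⟩
      have hgd : (pvBump l r n).getD r.length 0 = x := by
        rw [List.getD_eq_getElem?_getD, pvBump_getElem?, hx, hr]
        simp
      rw [hx, hgd]
      simp
    · rw [if_neg hk, pvBump_getElem?]
      by_cases hk2 : k < r.length
      · rw [List.getElem?_append_left hk2]
      · have h1 : r[k]? = none := List.getElem?_eq_none_iff.mpr (by omega)
        have h2 : (r ++ [n])[k]? = none := by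
          apply List.getElem?_eq_none_iff.mpr
          simp only [List.length_append, List.length_cons, List.length_nil]
          omega
        rw [h1, h2]
  · rw [if_neg hnc]
    apply List.ext_getElem?
    intro k
    rw [pvBump_getElem?, pvBump_getElem?]
    by_cases hk : k < r.length
    · rw [List.getElem?_append_left hk]
    · have h1 : r[k]? = none := List.getElem?_eq_none_iff.mpr (by omega)
      by_cases hk2 : k = r.length
      · subst hk2
        have h2 : (r ++ [c])[r.length]? = some c := by simp
        rw [h1, h2]
        cases l[r.length]? <;> simp [Ne.symm hnc]
      · have h2 : (r ++ [c])[k]? = none := by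
          apply List.getElem?_eq_none_iff.mpr
          simp only [List.length_append, List.length_cons, List.length_nil]
          omega
        rw [h1, h2]

-- the inner (per-row) loop of B does not change the key set
theorem pvRow_contains (M : Nat) (seq : String) (d : PySem.Dict Char (List Int)) (c : Char) :
    ((PySem.List.pyRange 0 (M : Int)).foldl
        (fun d i =>
          if d.contains ((PySem.Str.pyGet? seq i).getD ' ') then
            d.modify ((PySem.Str.pyGet? seq i).getD ' ') []
              (fun l => PySem.List.pySetD l i (PySem.List.pyGetD l i 0 + 1))
          else d) d).contains c = d.contains c := by
  have hstep : ∀ (d' : PySem.Dict Char (List Int)) (i : Int),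
      (if d'.contains ((PySem.Str.pyGet? seq i).getD ' ') then
          d'.modify ((PySem.Str.pyGet? seq i).getD ' ') []
            (fun l => PySem.List.pySetD l i (PySem.List.pyGetD l i 0 + 1))
        else d').contains c = d'.contains c := by
    intro d' i
    by_cases hx : d'.contains ((PySem.Str.pyGet? seq i).getD ' ') = true
    · rw [if_pos hx, PySem.Dict.contains_modify]
      by_cases hcx : c = (PySem.Str.pyGet? seq i).getD ' '
      · subst hcx
        rw [beq_self_eq_true, Bool.true_or, hx]
      · have hbe : (c == ((PySem.Str.pyGet? seq i).getD ' ')) = false := by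
          simp only [beq_eq_false_iff_ne, ne_eq]
          exact hcx
        rw [hbe, Bool.false_or]
    · rw [if_neg hx]
  induction M with
  | zero => simp
  | succ M ih =>
      have hcast : ((M + 1 : Nat) : Int) = (M : Int) + 1 := by push_cast; ring
      rw [hcast, PySem.List.pyRange_one_succ_right (by omega), List.foldl_append,
        List.foldl_cons, List.foldl_nil, hstep, ih]

-- the inner (per-row) loop of B, described by pvBump
theorem pvRow_getD (M : Nat) (seq : String) (d : PySem.Dict Char (List Int)) (n : Char)
    (hn : d.contains n = true)
    (hc : ∀ c, d.contains c = true → c ∈ (['A', 'C', 'G', 'T'] : List Char))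
     :
    (∀ m ∈ (['A', 'C', 'G', 'T'] : List Char), M ≤ (d.getD m []).length) →
    ((PySem.List.pyRange 0 (M : Int)).foldl
        (fun d i =>
          if d.contains ((PySem.Str.pyGet? seq i).getD ' ') then
            d.modify ((PySem.Str.pyGet? seq i).getD ' ') []
              (fun l => PySem.List.pySetD l i (PySem.List.pyGetD l i 0 + 1))
          else d) d).getD n [] = pvBump (d.getD n []) (seq.toList.take M) n := by
  induction M with
  | zero => intro _; simp [pvBump_nil]
  | succ M ih =>
      intro hl
      have hcast : ((M + 1 : Nat) : Int) = (M : Int) + 1 := by push_cast; ring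
      rw [hcast, PySem.List.pyRange_one_succ_right (by omega), List.foldl_append,
        List.foldl_cons, List.foldl_nil]
      have hlM : ∀ m ∈ (['A', 'C', 'G', 'T'] : List Char), M ≤ (d.getD m []).length :=
        fun m hm => le_trans (Nat.le_succ M) (hl m hm)
      have hDc := pvRow_contains M seq d
      have hnlt : M < (d.getD n []).length := lt_of_lt_of_le (Nat.lt_succ_self M) (hl n (hc n hn))
      by_cases hM : M < seq.toList.length
      · have hchv : (PySem.Str.pyGet? seq (M : Int)).getD ' ' = seq.toList[M] := by
          rw [PySem.Str.pyGet?_natCast, List.getElem?_eq_getElem hM]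
          rfl
        have htake : seq.toList.take (M + 1) = seq.toList.take M ++ [seq.toList[M]] := by
          rw [List.take_add_one, List.getElem?_eq_getElem hM]
          rfl
        have hlen2 : (seq.toList.take M).length = M := by
          rw [List.length_take]
          omega
        have hnlt' : (seq.toList.take M).length < (d.getD n []).length := by
          rw [hlen2]
          exact hnlt
        rw [htake, hchv, pvBump_append _ _ _ _ hnlt', hlen2]
        by_cases hdc : d.contains (seq.toList[M]) = true
        · rw [if_pos (by rw [hDc]; exact hdc), PySem.Dict.getD_modify]
          by_cases hnc : n = seq.toList[M]
          · rw [if_pos hnc, if_pos hnc, ← hnc, ih hlM, PySem.List.pySetD_natCast,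
              PySem.List.pyGetD_natCast]
          · rw [if_neg hnc, if_neg hnc, ih hlM]
        · rw [if_neg (by rw [hDc]; exact hdc)]
          have hnc : n ≠ seq.toList[M] := fun hh => hdc (hh ▸ hn)
          rw [if_neg hnc, ih hlM]
      · have hchv : (PySem.Str.pyGet? seq (M : Int)).getD ' ' = ' ' := by
          rw [PySem.Str.pyGet?_natCast, List.getElem?_eq_none_iff.mpr (by omega)]
          rfl
        have hsp : d.contains ' ' ≠ true := fun hh => by
          have := hc ' ' hh
          simp at this
        rw [hchv, hDc, if_neg hsp]
        have htake : seq.toList.take (M + 1) = seq.toList.take M := by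
          rw [List.take_of_length_le (by omega), List.take_of_length_le (by omega)]
        rw [htake, ih hlM]

-- the outer loop of B, per nucleotide, as a fold of pvBump over the rows
theorem pvOuter (vals : List String) (N : Nat) (d : PySem.Dict Char (List Int)) (n : Char)
    (hn : n ∈ (['A', 'C', 'G', 'T'] : List Char))
    (hcc : ∀ c, d.contains c = true ↔ c ∈ (['A', 'C', 'G', 'T'] : List Char))
    (hl : ∀ m ∈ (['A', 'C', 'G', 'T'] : List Char), (d.getD m []).length = N) :
    (vals.foldl
        (fun d seq =>
          (PySem.List.pyRange 0 (N : Int)).foldl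
            (fun d i =>
              if d.contains ((PySem.Str.pyGet? seq i).getD ' ') then
                d.modify ((PySem.Str.pyGet? seq i).getD ' ') []
                  (fun l => PySem.List.pySetD l i (PySem.List.pyGetD l i 0 + 1))
              else d) d) d).getD n []
      = vals.foldl (fun l v => pvBump l (v.toList.take N) n) (d.getD n []) := by
  induction vals generalizing d with
  | nil => simp
  | cons v vals ih =>
      rw [List.foldl_cons, List.foldl_cons]
      have hDc := pvRow_contains N v d
      have hDget : ∀ m, m ∈ (['A', 'C', 'G', 'T'] : List Char) →
          ((PySem.List.pyRange 0 (N : Int)).foldl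
            (fun d i =>
              if d.contains ((PySem.Str.pyGet? v i).getD ' ') then
                d.modify ((PySem.Str.pyGet? v i).getD ' ') []
                  (fun l => PySem.List.pySetD l i (PySem.List.pyGetD l i 0 + 1))
              else d) d).getD m []
            = pvBump (d.getD m []) (v.toList.take N) m :=
        fun m hm =>
          pvRow_getD N v d m ((hcc m).mpr hm) (fun c h => (hcc c).mp h)
            (fun m' hm' => le_of_eq (hl m' hm').symm)
      rw [ih _ (fun c => by rw [hDc c]; exact hcc c)
          (fun m hm => by rw [hDget m hm, pvBump_length]; exact hl m hm),
        hDget n hn]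

-- folding pvBump over the rows counts, at each position, the rows carrying nucleotide n
theorem pvFoldBump_getElem? (vals : List String) (N : Nat) (n : Char) (l0 : List Int) (k : Nat) :
    (vals.foldl (fun l v => pvBump l (v.toList.take N) n) l0)[k]?
      = l0[k]?.map (fun x =>
          x + ((vals.countP (fun v => decide ((v.toList.take N)[k]? = some n))) : Int)) := by
  induction vals generalizing l0 with
  | nil =>
      cases hx : l0[k]? <;> simp [hx]
  | cons v vals ih =>
      rw [List.foldl_cons, ih, pvBump_getElem?, List.countP_cons]
      cases hx : l0[k]? with
      | none => simp
      | some x =>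
          by_cases hv : (v.toList.take N)[k]? = some n
          · simp [hv]
            ring
          · simp [hv]

theorem pvCnt_eq_countP (vals : List String) (n : Char) (N k : Nat) (hk : k < N)
    (hn : n ≠ ' ') :
    pvCntN vals n k
      = ((vals.countP (fun v => decide ((v.toList.take N)[k]? = some n))) : Int) := by
  unfold pvCntN pvCnt pvSite
  congr 1
  rw [show ∀ (s : List Char), PySem.List.count s n = List.count n s from fun s => by simp [PySem.List.count]]
  rw [List.count_eq_countP, List.countP_map]
  apply List.countP_congr
  intro v _
  simp only [Function.comp]
  rw [PySem.Str.pyGet?_natCast, List.getElem?_take, if_pos hk]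
  cases hv : v.toList[k]? with
  | none => simp [Ne.symm hn]
  | some c =>
      by_cases hcn : c = n <;> simp [hcn]

-- B's final count list for nucleotide n is the list of A's column counts
theorem pvCountsList (vals : List String) (N : Nat) (n : Char) (hn : n ≠ ' ') :
    vals.foldl (fun l v => pvBump l (v.toList.take N) n) (List.replicate N 0)
      = (List.range N).map (pvCntN vals n) := by
  apply List.ext_getElem?
  intro k
  rw [pvFoldBump_getElem?, List.getElem?_replicate]
  by_cases hk : k < N
  · rw [if_pos hk, List.getElem?_map, List.getElem?_range hk]
    simp only [Option.map_some]
    rw [pvCnt_eq_countP vals n N k hk hn]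
    simp
  · rw [if_neg hk, List.getElem?_eq_none_iff.mpr (by simpa using hk)]
    simp

-- joining with ' ' equals appending ' ' after every piece and dropping the final one
theorem pvJoin_eq {α : Type} (f : α → List Char) (l : List α) :
    (l.flatMap (fun x => f x ++ [' '])).dropLast = PySem.Chars.join [' '] (l.map f) := by
  induction l with
  | nil => simp [PySem.Chars.join_nil]
  | cons x l ih =>
      cases l with
      | nil => simp [PySem.Chars.join_singleton]
      | cons y t =>
          rw [List.map_cons, List.map_cons, PySem.Chars.join_cons_cons, List.flatMap_cons,
            List.dropLast_append]
          have hne : (((y :: t).flatMap fun x => f x ++ [' ']).isEmpty) = false := by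
            simp [List.flatMap_cons]
          rw [hne]
          simp only [Bool.false_eq_true, if_false]
          rw [ih, List.map_cons]

-- A's range-loop, unrolled per nucleotide
theorem pvAfold (vals : List String) (N : Nat) :
    ((PySem.List.pyRange 0 (N : Int)).foldl
        (fun acc index =>
          List.zipWith (fun new_pos old_pos => old_pos ++ new_pos ++ [' '])
            ("ACGT".toList.map
              (fun nucl => PySem.Int.toChars
                ((PySem.List.count (vals.map (fun x => (PySem.Str.pyGet? x index).getD ' ')) nucl : Nat) : Int)))
            acc)
        ([[], [], [], []] : List (List Char)))
      = [pvColStr vals 'A' N, pvColStr vals 'C' N, pvColStr vals 'G' N, pvColStr vals 'T' N] := by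
  induction N with
  | zero => simp [pvColStr]
  | succ N ih =>
      have hcast : ((N + 1 : Nat) : Int) = (N : Int) + 1 := by push_cast; ring
      rw [hcast, PySem.List.pyRange_one_succ_right (by omega), List.foldl_append, ih]
      rw [List.foldl_cons, List.foldl_nil]
      simp only [show "ACGT".toList = ['A', 'C', 'G', 'T'] from rfl, List.map_cons, List.map_nil,
        List.zipWith_cons_cons, List.zipWith_nil_right]
      unfold pvColStr
      rw [List.range_succ]
      simp [pvCnt, pvSite]

-- slice x[:-1] on char lists, from the library's Str lemma
theorem pvSlice_neg_one (x : List Char) :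
    PySem.List.slice x none (some (-1)) = x.dropLast := by
  simpa using PySem.Str.slice_to_neg_one (String.ofList x)

-- items of A's final key-insertion loop
theorem pvItemsA (sa sc sg st : List Char) :
    ((List.zip (["A", "C", "G", "T"] : List String) [sa, sc, sg, st]).foldl
        (fun d p => d.insert p.1 (String.ofList p.2)) PySem.Dict.empty).items
      = [("A", String.ofList sa), ("C", String.ofList sc), ("G", String.ofList sg),
         ("T", String.ofList st)] := by
  simp [List.zip, PySem.Dict.items_insert_of_not_contains, PySem.Dict.contains_insert,
    PySem.Dict.contains_empty, show (PySem.Dict.empty : PySem.Dict String String).items = [] from rfl]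

-- items of B's final dict comprehension
theorem pvItemsB (f : Char → String) :
    ("ACGT".toList.foldl (fun out n => out.insert (String.ofList [n]) (f n))
        PySem.Dict.empty).items
      = [("A", f 'A'), ("C", f 'C'), ("G", f 'G'), ("T", f 'T')] := by
  simp [show "ACGT".toList = ['A', 'C', 'G', 'T'] from rfl,
    PySem.Dict.items_insert_of_not_contains, PySem.Dict.contains_insert,
    PySem.Dict.contains_empty, show (PySem.Dict.empty : PySem.Dict String String).items = [] from rfl]

-- B's initial table, explicitly
theorem pvCounts0 (N : Nat) :
    ("ACGT".toList.foldl (fun d n => d.insert n (List.replicate N (0 : Int))) PySem.Dict.empty)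
      = ((((PySem.Dict.empty.insert 'A' (List.replicate N (0 : Int))).insert 'C'
            (List.replicate N 0)).insert 'G' (List.replicate N 0)).insert 'T'
            (List.replicate N 0)) := by
  rfl

-- B's whole counting phase, per nucleotide
theorem pvCounts (vals : List String) (N : Nat) (n : Char)
    (hn : n ∈ (['A', 'C', 'G', 'T'] : List Char)) :
    ((vals.foldl
        (fun d seq =>
          (PySem.List.pyRange 0 (N : Int)).foldl
            (fun d i =>
              if d.contains ((PySem.Str.pyGet? seq i).getD ' ') then
                d.modify ((PySem.Str.pyGet? seq i).getD ' ') []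
                  (fun l => PySem.List.pySetD l i (PySem.List.pyGetD l i 0 + 1))
              else d) d)
        ("ACGT".toList.foldl (fun d n => d.insert n (List.replicate N 0)) PySem.Dict.empty)).getD n [])
      = (List.range N).map (pvCntN vals n) := by
  rw [pvCounts0]
  have hcc : ∀ c, (((((PySem.Dict.empty.insert 'A' (List.replicate N (0 : Int))).insert 'C'
        (List.replicate N 0)).insert 'G' (List.replicate N 0)).insert 'T'
        (List.replicate N 0))).contains c = true ↔ c ∈ (['A', 'C', 'G', 'T'] : List Char) := by
    intro c
    simp [PySem.Dict.contains_insert, PySem.Dict.contains_empty]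
    tauto
  have hgd : ∀ m ∈ (['A', 'C', 'G', 'T'] : List Char),
      (((((PySem.Dict.empty.insert 'A' (List.replicate N (0 : Int))).insert 'C'
        (List.replicate N 0)).insert 'G' (List.replicate N 0)).insert 'T'
        (List.replicate N 0))).getD m [] = List.replicate N 0 := by
    intro m hm
    fin_cases hm <;> simp [PySem.Dict.getD_insert]
  rw [pvOuter vals N _ n hn hcc (by intro m hm; rw [hgd m hm]; simp), hgd n hn]
  have hn' : n ≠ ' ' := by fin_cases hn <;> decide
  exact pvCountsList vals N n hn'

-- one output entry: A's sliced column string equals B's joined count list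
theorem pvEntry (vals : List String) (N : Nat) (n : Char) :
    PySem.List.slice (pvColStr vals n N) none (some (-1))
      = PySem.Chars.join [' '] (((List.range N).map (pvCntN vals n)).map PySem.Int.toChars) := by
  rw [pvSlice_neg_one]
  unfold pvColStr
  rw [pvJoin_eq (fun (k : Nat) => PySem.Int.toChars (pvCnt vals n (k : Int))) (List.range N)]
  simp [pvCntN, Function.comp_def]

-- the two programs, as functions of the (shared) list of dict values
theorem pvCore (vals : List String) :
    ((List.zip (["A", "C", "G", "T"] : List String) (((PySem.List.pyRange 0 (PySem.Str.len (vals.headD ""))).foldl (fun acc index => List.zipWith (fun new_pos old_pos => old_pos ++ new_pos ++ [' ']) ("ACGT".toList.map (fun nucl => PySem.Int.toChars ((PySem.List.count (vals.map (fun x => (PySem.Str.pyGet? x index).getD ' ')) nucl : Nat) : Int))) acc) ([[], [], [], []] : List (List Char))).map (fun x => PySem.List.slice x none (some (-1))))).foldl (fun (d : PySem.Dict String String) (p : String × List Char) => d.insert p.1 (String.ofList p.2)) PySem.Dict.empty).items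
    = ("ACGT".toList.foldl (fun (out : PySem.Dict String String) n => out.insert (String.ofList [n]) (String.ofList (PySem.Chars.join [' '] (((vals.foldl (fun (d : PySem.Dict Char (List Int)) (seq : String) => (PySem.List.pyRange 0 (PySem.Str.len (vals.headD ""))).foldl
            (fun d i =>
              if d.contains ((PySem.Str.pyGet? seq i).getD ' ') then
                d.modify ((PySem.Str.pyGet? seq i).getD ' ') []
                  (fun l => PySem.List.pySetD l i (PySem.List.pyGetD l i 0 + 1))
              else d) d) ("ACGT".toList.foldl (fun (d : PySem.Dict Char (List Int)) n => d.insert n (List.replicate (PySem.Str.len (vals.headD "")).toNat 0)) PySem.Dict.empty)).getD n []).map PySem.Int.toChars)))) PySem.Dict.empty).items := by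
  have hN : PySem.Str.len (vals.headD "") = (((vals.headD "").toList.length : Nat) : Int) := by
    simp
  rw [hN]
  set N := (vals.headD "").toList.length with hNdef
  rw [pvAfold vals N]
  simp only [Int.toNat_natCast, List.map_cons, List.map_nil]
  rw [pvItemsA, pvItemsB]
  rw [pvCounts vals N 'A' (by decide), pvCounts vals N 'C' (by decide),
    pvCounts vals N 'G' (by decide), pvCounts vals N 'T' (by decide)]
  rw [pvEntry vals N 'A', pvEntry vals N 'C', pvEntry vals N 'G', pvEntry vals N 'T']

-- ===== VERDICT (by name: the statement is the Claim_ definition above) =====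
theorem get_site_count_spec : Claim_equal_get_site_count := by
  unfold Claim_equal_get_site_count
  intro seq_dict _ _
  exact pvCore ((PySem.Dict.ofList seq_dict).values)
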